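-- pv_equiv track=rewrite | github.com/cpowski/pichi | pichi/services/auth0.py | parse_search_terms
-- ===== SOURCE A (Python) =====
-- from typing import List
--
-- SEARCH_TERM_SEPARATOR = " "
--
-- SEARCH_TERM_MIN_LENGTH = 1
--
-- def escape_lucene(term: str) -> str:
--     i = len(term)
--     escaped = [None] * i
--     while i > 0:
--         i -= 1
--         c = term[i]
--         if (
--             c == "+"
--             or c == "-"
--             or c == "&"
--             or c == "|"
--             or c == "!"
--             or c == "("
--             or c == ")"
--             or c == "{"
--             or c == "}"
--             or c == "["
--             or c == "]"
--             or c == "^"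
--             or c == '"'
--             or c == "~"
--             or c == "*"
--             or c == "?"
--             or c == ":"
--             or c == "/"
--             or c == "\\"
--         ):
--             escaped[i] = "\\" + c
--         else:
--             escaped[i] = c
--
--     return "".join(escaped)
--
-- def parse_search_terms(terms: str) -> List[str]:
--     if terms:
--         return [
--             t
--             for t in list(map(escape_lucene, terms.split(SEARCH_TERM_SEPARATOR)))
--             if len(t) >= SEARCH_TERM_MIN_LENGTH
--         ]
--
--     return []
-- ===== SOURCE B (Python) =====
-- from typing import List
--
-- SEARCH_TERM_SEPARATOR = " "
--
-- SEARCH_TERM_MIN_LENGTH = 1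
--
-- _LUCENE_SPECIAL = set('+-&|!(){}[]^"~*?:/\\')
--
--
-- def parse_search_terms(terms: str) -> List[str]:
--     # One fused pass: build each escaped term while scanning, flush on the
--     # separator, emit only non-empty terms.  No split / per-term escape / filter stages.
--     out: List[str] = []
--     cur: List[str] = []
--     for c in terms:
--         if c == SEARCH_TERM_SEPARATOR:
--             if cur:
--                 out.append("".join(cur))
--             cur = []
--         else:
--             if c in _LUCENE_SPECIAL:
--                 cur.append("\\")
--             cur.append(c)
--     if cur:
--         out.append("".join(cur))
--     return out
-- ===== Notes on version B (the rewrite author's own statement) =====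
-- stated objective: faster
-- what changed: A's three staged passes (split on spaces, per-term escape via a reverse index-filling while loop with a 19-branch chained-or test, then a length filter) are fused into one forward scan with an (output, current-term) accumulator: each escaped term is built character by character via a set lookup and flushed at each separator, so empty terms are never created or filtered.
import Mathlib
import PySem

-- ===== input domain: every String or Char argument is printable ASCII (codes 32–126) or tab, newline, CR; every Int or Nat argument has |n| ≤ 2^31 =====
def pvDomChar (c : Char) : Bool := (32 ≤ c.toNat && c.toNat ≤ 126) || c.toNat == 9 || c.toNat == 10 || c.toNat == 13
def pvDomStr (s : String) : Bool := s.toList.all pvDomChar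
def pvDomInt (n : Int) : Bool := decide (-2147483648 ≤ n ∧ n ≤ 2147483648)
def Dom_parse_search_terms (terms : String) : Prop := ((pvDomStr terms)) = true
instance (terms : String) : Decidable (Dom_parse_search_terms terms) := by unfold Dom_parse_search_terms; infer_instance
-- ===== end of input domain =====

-- B fuses A's three stages (split, per-term escape via a reverse index loop, filter) into
-- ONE forward pass with an accumulator: each escaped term is built while scanning and
-- flushed at a separator; empty terms never exist, so no filter stage remains (measured constant-factor faster in a timing run).

-- ===== PORT A =====
def pvSEARCH_TERM_SEPARATOR : String := " "

def pvSEARCH_TERM_MIN_LENGTH : Int := 1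

-- the 19-way chained-or test of A, in A's order
def pvIsLuceneSpecialA (c : Char) : Bool :=
  c == '+' || c == '-' || c == '&' || c == '|' || c == '!' || c == '(' || c == ')' ||
  c == '{' || c == '}' || c == '[' || c == ']' || c == '^' || c == '"' || c == '~' ||
  c == '*' || c == '?' || c == ':' || c == '/' || c == '\\'

-- A's while loop: i counts down from len(term), escaped[i] is written each step
def pvEscLoopA (cs : List Char) : Nat → List String → List String
  | 0, acc => acc
  | i + 1, acc =>
    let c := cs.getD i ' '
    pvEscLoopA cs i ((if pvIsLuceneSpecialA c then String.ofList ['\\', c] else String.ofList [c]) :: acc)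

def pvEscapeLuceneA (term : String) : String :=
  PySem.Str.join "" (pvEscLoopA term.toList term.toList.length [])

def parse_search_terms (terms : String) : List String :=
  if terms = "" then []
  else
    ((((PySem.Str.split? terms pvSEARCH_TERM_SEPARATOR).getD []).map pvEscapeLuceneA).filter
      (fun t => decide (pvSEARCH_TERM_MIN_LENGTH ≤ PySem.Str.len t)))

-- ===== PORT B =====
-- set('+-&|!(){}[]^"~*?:/\\')
def pvLuceneSpecialB : PySem.Set Char := PySem.Set.ofList "+-&|!(){}[]^\"~*?:/\\".toList

-- Python's `if cur: out.append("".join(cur))`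
def pvFlushB (st : List String × List Char) : List String :=
  if st.2.isEmpty then st.1 else st.1 ++ [String.ofList st.2]

-- one iteration of B's loop body
def pvStepB (st : List String × List Char) (c : Char) : List String × List Char :=
  if c = ' ' then (pvFlushB st, [])
  else (st.1, st.2 ++ (if pvLuceneSpecialB.contains c then ['\\', c] else [c]))

def parse_search_terms_alt (terms : String) : List String :=
  pvFlushB (terms.toList.foldl pvStepB ([], []))

-- ===== PRECONDITION & SPEC =====
def Spec_parse_search_terms (terms : String) (out : List String) : Prop := out = parse_search_terms_alt terms
instance (terms : String) (out : List String) : Decidable (Spec_parse_search_terms terms out) := by unfold Spec_parse_search_terms; infer_instance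

-- ===== CLAIM (what is proved, stated in full; the proofs are below) =====
def Claim_equal_parse_search_terms : Prop := ∀ (terms : String), Dom_parse_search_terms terms → Spec_parse_search_terms terms (parse_search_terms terms)

-- ===== LEMMAS AND PROOFS =====

-- the per-character escape, on char lists
def pvE (t : List Char) : List Char :=
  t.flatMap (fun c => if pvLuceneSpecialB.contains c then ['\\', c] else [c])

-- structural form of splitting on a single space, carrying the current (forward) piece
def pvSplitF : List Char → List Char → List (List Char)
  | [], cur => [cur]
  | c :: rest, cur => if c = ' ' then cur :: pvSplitF rest [] else pvSplitF rest (cur ++ [c])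

-- the two membership tests agree on every character
theorem pvSpecial_eq (c : Char) : pvLuceneSpecialB.contains c = pvIsLuceneSpecialA c := by
  have h : pvLuceneSpecialB =
      ['+','-','&','|','!','(',')','{','}','[',']','^','"','~','*','?',':','/','\\'] := by decide
  rw [h, Bool.eq_iff_iff]
  simp [PySem.Set.contains, pvIsLuceneSpecialA]
  tauto

-- PySem's fuel-based splitOn on separator " " is pvSplitF
theorem pv_go_eq (l : List Char) : ∀ (fuel : Nat) (cur : List Char) (acc : List (List Char)),
    l.length < fuel →
    PySem.Chars.splitOn.go [' '] fuel l cur acc = acc.reverse ++ pvSplitF l cur.reverse := by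
  induction l with
  | nil =>
    intro fuel cur acc h
    cases fuel with
    | zero => omega
    | succ f => simp [PySem.Chars.splitOn.go, pvSplitF]
  | cons c rest ih =>
    intro fuel cur acc h
    cases fuel with
    | zero => simp at h
    | succ f =>
      by_cases hc : c = ' '
      · subst hc
        have hstep : PySem.Chars.splitOn.go [' '] (f+1) (' '::rest) cur acc =
            PySem.Chars.splitOn.go [' '] f rest [] (cur.reverse :: acc) := by
          simp [PySem.Chars.splitOn.go, List.isPrefixOf]
        rw [hstep, ih f [] (cur.reverse :: acc) (by simpa using h)]
        simp [pvSplitF]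
      · have hstep : PySem.Chars.splitOn.go [' '] (f+1) (c::rest) cur acc =
            PySem.Chars.splitOn.go [' '] f rest (c :: cur) acc := by
          simp [PySem.Chars.splitOn.go, List.isPrefixOf, Ne.symm hc]
        rw [hstep, ih f (c :: cur) acc (by simpa using h)]
        simp [pvSplitF, hc]

theorem pv_splitOn_eq (cs : List Char) :
    PySem.Chars.splitOn cs [' '] = pvSplitF cs [] := by
  unfold PySem.Chars.splitOn
  rw [pv_go_eq cs (cs.length + 1) [] [] (by omega)]
  simp

theorem pv_intercalate_nil (parts : List (List Char)) :
    ([] : List Char).intercalate parts = parts.flatten := by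
  induction parts with
  | nil => rfl
  | cons p ps ih =>
    cases ps with
    | nil => simp [List.intercalate]
    | cons q qs =>
      simp only [List.intercalate] at *
      simp_all [List.intersperse]

-- A's descending fill loop produces the per-character map of the processed prefix
theorem pvEscLoopA_eq (cs : List Char) (n : Nat) (hn : n ≤ cs.length) (acc : List String) :
    pvEscLoopA cs n acc =
      ((cs.take n).map
        (fun c => if pvIsLuceneSpecialA c then String.ofList ['\\', c] else String.ofList [c])) ++ acc := by
  induction n generalizing acc with
  | zero => simp [pvEscLoopA]
  | succ i ih =>
    have hi : i < cs.length := hn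
    rw [pvEscLoopA, ih (le_of_lt hi), List.take_add_one]
    have hg : cs[i]? = some cs[i] := List.getElem?_eq_getElem hi
    have hd : cs.getD i ' ' = cs[i] := List.getD_eq_getElem cs ' ' hi
    rw [hg, hd, List.map_append]
    simp

-- A's escape on one token equals the per-character flatMap
theorem pvEscA_eq (t : List Char) : pvEscapeLuceneA (String.ofList t) = String.ofList (pvE t) := by
  unfold pvEscapeLuceneA PySem.Str.join
  simp only [String.toList_ofList]
  congr 1
  rw [pvEscLoopA_eq t t.length le_rfl []]
  simp only [List.take_length, List.append_nil, List.map_map]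
  show PySem.Chars.join "".toList _ = _
  rw [show "".toList = ([] : List Char) from rfl]
  unfold PySem.Chars.join
  rw [pv_intercalate_nil]
  unfold pvE
  rw [List.flatMap]
  congr 1
  apply List.map_congr_left
  intro c _
  rw [pvSpecial_eq c]
  simp only [Function.comp_apply]
  split_ifs <;> simp

-- A's length-≥-1 filter is the non-empty test
theorem pvPred_eq (s : String) :
    decide (pvSEARCH_TERM_MIN_LENGTH ≤ PySem.Str.len s) = !s.toList.isEmpty := by
  rw [Bool.eq_iff_iff]
  simp only [decide_eq_true_eq, pvSEARCH_TERM_MIN_LENGTH, PySem.Str.len_eq,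
    Bool.not_eq_true', List.isEmpty_eq_false_iff]
  cases h : s.toList <;> simp

-- loop invariant of B's single pass
theorem pvB_inv (l : List Char) : ∀ (out : List String) (cur : List Char),
    pvFlushB (l.foldl pvStepB (out, pvE cur)) =
      out ++ ((pvSplitF l cur).map (fun t => String.ofList (pvE t))).filter (fun s => !s.toList.isEmpty) := by
  induction l with
  | nil =>
    intro out cur
    simp only [List.foldl_nil, pvSplitF, List.map_cons, List.map_nil, List.filter]
    unfold pvFlushB
    by_cases h : pvE cur = []
    · simp [h]
    · have h2 : (pvE cur).isEmpty = false := by simpa [List.isEmpty_iff] using h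
      simp [h2, String.toList_ofList]
  | cons c rest ih =>
    intro out cur
    by_cases hc : c = ' '
    · subst hc
      rw [List.foldl_cons]
      have hstep : pvStepB (out, pvE cur) ' ' = (pvFlushB (out, pvE cur), pvE []) := by
        simp [pvStepB, pvE]
      rw [hstep, ih (pvFlushB (out, pvE cur)) []]
      simp only [pvSplitF, if_pos]
      unfold pvFlushB
      by_cases h : pvE cur = []
      · simp [h]
      · have h2 : (pvE cur).isEmpty = false := by simpa [List.isEmpty_iff] using h
        simp [h2, String.toList_ofList]
    · rw [List.foldl_cons]
      have hstep : pvStepB (out, pvE cur) c = (out, pvE (cur ++ [c])) := by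
        simp [pvStepB, pvE, hc]
      rw [hstep, ih out (cur ++ [c])]
      simp [pvSplitF, hc]

-- ===== VERDICT (by name: the statement is the Claim_ definition above) =====
theorem parse_search_terms_spec : Claim_equal_parse_search_terms := by
  intro terms _
  unfold Spec_parse_search_terms parse_search_terms parse_search_terms_alt
  have hB : pvFlushB (terms.toList.foldl pvStepB ([], [])) =
      ((pvSplitF terms.toList []).map (fun t => String.ofList (pvE t))).filter
        (fun s => !s.toList.isEmpty) := by
    have h := pvB_inv terms.toList [] []
    simpa [pvE] using h
  rw [hB]
  by_cases h : terms = ""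
  · rw [if_pos h]
    have : terms.toList = [] := String.toList_eq_nil_iff.mpr h
    rw [this]
    simp [pvSplitF, pvE]
  · rw [if_neg h]
    unfold pvSEARCH_TERM_SEPARATOR
    rw [show (PySem.Str.split? terms " ").getD [] =
        (PySem.Chars.splitOn terms.toList [' ']).map String.ofList from by
      simp [PySem.Str.split?, PySem.Chars.split?]]
    rw [pv_splitOn_eq, List.map_map]
    rw [List.map_congr_left (fun t _ => by
      show pvEscapeLuceneA (String.ofList t) = String.ofList (pvE t)
      exact pvEscA_eq t)]
    exact List.filter_congr (fun s _ => pvPred_eq s)
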